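-- pv_equiv track=rewrite | github.com/JavaFXpert/quantum-music-service | quantum-music-service.py | create_toy_piano
-- ===== SOURCE A (Python) =====
-- def create_toy_piano(melody_note_nums, harmony_note_nums):
--     # For now, assume second-species counterpoint (two notes in harmony for each note in melody)
--     quarter_note_dur = 150
--     notes = []
--     latest_melody_idx = 0
--     latest_harmony_idx = 0
--     num_pitches_in_octave = 7
--     toy_piano_pitch_offset = 1
--
--     for idx, pitch in enumerate(melody_note_nums):
--         notes.append({"num": pitch + toy_piano_pitch_offset, "time": idx * quarter_note_dur * 2})
--         latest_melody_idx = idx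
--
--     # Add the same pitch to the end of the melody as in the beginning
--     notes.append({"num": melody_note_nums[0] + toy_piano_pitch_offset, "time": (latest_melody_idx + 1) * quarter_note_dur * 2})
--
--     for idx, pitch in enumerate(harmony_note_nums):
--         notes.append({"num": pitch + num_pitches_in_octave + toy_piano_pitch_offset, "time": idx * quarter_note_dur})
--         latest_harmony_idx = idx
--
--     # Add the same pitch to the end of the harmony as in the beginning of the melody,
--     # only an octave higher
--     notes.append({"num": melody_note_nums[0] + num_pitches_in_octave + toy_piano_pitch_offset, "time": (latest_harmony_idx + 1) * quarter_note_dur})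
--
--     # Sort the array of dictionaries by time
--     sorted_notes = sorted(notes, key=lambda k: k['time'])
--
--     return sorted_notes
-- ===== SOURCE B (Python) =====
-- def create_toy_piano(melody_note_nums, harmony_note_nums):
--     m0 = melody_note_nums[0]
--     melody = [{"num": p + 1, "time": 300 * i} for i, p in enumerate(melody_note_nums)]
--     melody.append({"num": m0 + 1, "time": 300 * len(melody_note_nums)})
--     harmony = [{"num": p + 8, "time": 150 * i} for i, p in enumerate(harmony_note_nums)]
--     harmony.append({"num": m0 + 8, "time": 150 * len(harmony_note_nums)})
--     # stable merge of the two already-time-sorted lists, melody first on ties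
--     out = []
--     i = j = 0
--     while i < len(melody) and j < len(harmony):
--         if melody[i]["time"] <= harmony[j]["time"]:
--             out.append(melody[i]); i += 1
--         else:
--             out.append(harmony[j]); j += 1
--     out.extend(melody[i:])
--     out.extend(harmony[j:])
--     return out
-- ===== Notes on version B (the rewrite author's own statement) =====
-- stated objective: alternative
-- what changed: Instead of concatenating melody and harmony note dicts and calling sorted() with a key lambda, B builds the two lists already time-ordered and combines them with a single stable merge pass (melody first on ties).
-- intended difference: When harmony_note_nums is empty (and melody is not), A places the appended closing harmony note at time 150 because latest_harmony_idx is leftover loop state that was never set, while B places it at time 150*len(harmony)=0, the position the comment 'add to the end of the harmony' intends. — e.g. on create_toy_piano([60], []): A returns [[("num", 61), ("time", 0)], [("num", 68), ("time", 150)], [("num", 61), ("time", 300)]], B returns [[("num", 61), ("time", 0)], [("num", 68), ("time", 0)], [("num", 61), ("time", 300)]]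
import Mathlib
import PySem

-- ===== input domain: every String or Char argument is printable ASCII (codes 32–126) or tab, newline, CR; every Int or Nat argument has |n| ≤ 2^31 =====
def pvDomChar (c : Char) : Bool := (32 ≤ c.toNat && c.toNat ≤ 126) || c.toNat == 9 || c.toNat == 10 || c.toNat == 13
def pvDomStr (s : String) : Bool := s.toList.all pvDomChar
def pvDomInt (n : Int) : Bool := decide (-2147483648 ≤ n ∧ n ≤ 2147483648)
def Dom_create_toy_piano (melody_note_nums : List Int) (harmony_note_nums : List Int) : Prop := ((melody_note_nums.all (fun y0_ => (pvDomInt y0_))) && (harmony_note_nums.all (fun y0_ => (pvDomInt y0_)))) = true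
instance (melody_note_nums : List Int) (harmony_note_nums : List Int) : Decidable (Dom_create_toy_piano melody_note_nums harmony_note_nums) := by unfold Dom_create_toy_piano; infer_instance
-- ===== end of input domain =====

-- B replaces A's append-everything-then-sorted() with building the two already
-- time-ordered note lists and one stable merge pass (melody first on ties).

-- ===== PORT A =====
def create_toy_piano (melody_note_nums : List Int) (harmony_note_nums : List Int) : List (List (String × Int)) :=
  let quarter_note_dur : Int := 150
  let num_pitches_in_octave : Int := 7
  let toy_piano_pitch_offset : Int := 1
  let s1 := (PySem.List.enumerate melody_note_nums).foldl
      (fun (s : List (List (String × Int)) × Int) ip =>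
        (s.1 ++ [[("num", ip.2 + toy_piano_pitch_offset), ("time", ip.1 * quarter_note_dur * 2)]], ip.1))
      ([], 0)
  let first : Int := (PySem.List.pyGet? melody_note_nums 0).getD 0
  let notes1 := s1.1 ++ [[("num", first + toy_piano_pitch_offset), ("time", (s1.2 + 1) * quarter_note_dur * 2)]]
  let s2 := (PySem.List.enumerate harmony_note_nums).foldl
      (fun (s : List (List (String × Int)) × Int) ip =>
        (s.1 ++ [[("num", ip.2 + num_pitches_in_octave + toy_piano_pitch_offset), ("time", ip.1 * quarter_note_dur)]], ip.1))
      (notes1, 0)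
  let notes2 := s2.1 ++ [[("num", first + num_pitches_in_octave + toy_piano_pitch_offset), ("time", (s2.2 + 1) * quarter_note_dur)]]
  PySem.List.sorted notes2 (fun k => PySem.Dict.getD (PySem.Dict.mk k) "time" 0)

-- ===== PORT B =====
-- B-side helper: d["time"] of a note dict
def pvTime (d : List (String × Int)) : Int := PySem.Dict.getD (PySem.Dict.mk d) "time" 0

-- B-side helper: the while-loop merge of Source B (melody side first on equal times);
-- structural recursion on a fuel argument (fuel = |xs|+|ys| always suffices, so the
-- xs ++ ys branch at fuel 0 is never reached)
def pvMergeGo : Nat → List (List (String × Int)) → List (List (String × Int)) → List (List (String × Int))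
  | 0, xs, ys => xs ++ ys
  | _ + 1, [], ys => ys
  | _ + 1, x :: xs, [] => x :: xs
  | f + 1, x :: xs, y :: ys =>
      if pvTime x ≤ pvTime y then x :: pvMergeGo f xs (y :: ys) else y :: pvMergeGo f (x :: xs) ys

def pvMerge (xs ys : List (List (String × Int))) : List (List (String × Int)) :=
  pvMergeGo (xs.length + ys.length) xs ys

def create_toy_piano_alt (melody_note_nums : List Int) (harmony_note_nums : List Int) : List (List (String × Int)) :=
  let m0 : Int := (PySem.List.pyGet? melody_note_nums 0).getD 0
  let melody := (PySem.List.enumerate melody_note_nums).map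
      (fun ip => [("num", ip.2 + 1), ("time", 300 * ip.1)])
      ++ [[("num", m0 + 1), ("time", 300 * (melody_note_nums.length : Int))]]
  let harmony := (PySem.List.enumerate harmony_note_nums).map
      (fun ip => [("num", ip.2 + 8), ("time", 150 * ip.1)])
      ++ [[("num", m0 + 8), ("time", 150 * (harmony_note_nums.length : Int))]]
  pvMerge melody harmony

-- ===== PRECONDITION & SPEC =====
-- A evaluates melody_note_nums[0], an IndexError on the empty melody list: excluded.
def Pre_create_toy_piano (melody_note_nums : List Int) (harmony_note_nums : List Int) : Prop :=
  melody_note_nums ≠ []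
instance (melody_note_nums : List Int) (harmony_note_nums : List Int) : Decidable (Pre_create_toy_piano melody_note_nums harmony_note_nums) := by unfold Pre_create_toy_piano; infer_instance
def pvWitness_create_toy_piano : List Int × List Int := ([3, 5], [1, 2, 3, 4])

-- When harmony_note_nums is empty (and melody is not), A places the appended closing
-- harmony note at time 150 because latest_harmony_idx is leftover loop state that was
-- never set, while B places it at time 150*len(harmony) = 0, the position 'the end of
-- the harmony' intends.
def D_create_toy_piano (melody_note_nums : List Int) (harmony_note_nums : List Int) : Prop :=
  harmony_note_nums = []
instance (melody_note_nums : List Int) (harmony_note_nums : List Int) : Decidable (D_create_toy_piano melody_note_nums harmony_note_nums) := by unfold D_create_toy_piano; infer_instance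

def Spec_create_toy_piano (melody_note_nums : List Int) (harmony_note_nums : List Int) (out : List (List (String × Int))) : Prop := ¬ D_create_toy_piano melody_note_nums harmony_note_nums → out = create_toy_piano_alt melody_note_nums harmony_note_nums
instance (melody_note_nums : List Int) (harmony_note_nums : List Int) (out : List (List (String × Int))) : Decidable (Spec_create_toy_piano melody_note_nums harmony_note_nums out) := by unfold Spec_create_toy_piano; infer_instance

def pvDiffWitness_create_toy_piano : List Int × List Int := ([60], [])
def pvDiffWitnessOut_create_toy_piano : (List (List (String × Int))) × (List (List (String × Int))) :=
  ([[("num", 61), ("time", 0)], [("num", 68), ("time", 150)], [("num", 61), ("time", 300)]],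
   [[("num", 61), ("time", 0)], [("num", 68), ("time", 0)], [("num", 61), ("time", 300)]])

-- ===== CLAIM (what is proved, stated in full; the proofs are below) =====
def Claim_unchanged_create_toy_piano : Prop := ∀ (melody_note_nums : List Int) (harmony_note_nums : List Int), Dom_create_toy_piano melody_note_nums harmony_note_nums → Pre_create_toy_piano melody_note_nums harmony_note_nums → Spec_create_toy_piano melody_note_nums harmony_note_nums (create_toy_piano melody_note_nums harmony_note_nums)
def Claim_changed_create_toy_piano : Prop := Dom_create_toy_piano (pvDiffWitness_create_toy_piano.1) (pvDiffWitness_create_toy_piano.2) ∧ Pre_create_toy_piano (pvDiffWitness_create_toy_piano.1) (pvDiffWitness_create_toy_piano.2) ∧ D_create_toy_piano (pvDiffWitness_create_toy_piano.1) (pvDiffWitness_create_toy_piano.2) ∧ create_toy_piano (pvDiffWitness_create_toy_piano.1) (pvDiffWitness_create_toy_piano.2) = pvDiffWitnessOut_create_toy_piano.1 ∧ create_toy_piano_alt (pvDiffWitness_create_toy_piano.1) (pvDiffWitness_create_toy_piano.2) = pvDiffWitnessOut_create_toy_piano.2 ∧ pvDiffWitnessOut_create_toy_piano.1 ≠ 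pvDiffWitnessOut_create_toy_piano.2
def Claim_exact_create_toy_piano : Prop := ∀ (melody_note_nums : List Int) (harmony_note_nums : List Int), Dom_create_toy_piano melody_note_nums harmony_note_nums → Pre_create_toy_piano melody_note_nums harmony_note_nums → D_create_toy_piano melody_note_nums harmony_note_nums → create_toy_piano melody_note_nums harmony_note_nums ≠ create_toy_piano_alt melody_note_nums harmony_note_nums

-- ===== LEMMAS AND PROOFS =====

theorem pvMergeGo_fuel (f g : Nat) (xs ys : List (List (String × Int)))
    (hf : xs.length + ys.length ≤ f) (hg : xs.length + ys.length ≤ g) :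
    pvMergeGo f xs ys = pvMergeGo g xs ys := by
  induction f generalizing g xs ys with
  | zero =>
      have hx : xs = [] := by cases xs <;> simp_all
      have hy : ys = [] := by cases ys <;> simp_all
      subst hx; subst hy
      cases g <;> simp [pvMergeGo]
  | succ f ih =>
      cases xs with
      | nil => cases g <;> simp [pvMergeGo]
      | cons x xs' =>
          cases ys with
          | nil => cases g <;> simp [pvMergeGo]
          | cons y ys' =>
              cases g with
              | zero => simp at hg
              | succ g' =>
                  simp only [pvMergeGo]
                  simp only [List.length_cons] at hf hg
                  by_cases hc : pvTime x ≤ pvTime y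
                  · simp [hc, ih g' xs' (y :: ys') (by simp only [List.length_cons, Nat.add_eq]; omega) (by simp only [List.length_cons, Nat.add_eq]; omega)]
                  · simp [hc, ih g' (x :: xs') ys' (by simp only [List.length_cons, Nat.add_eq]; omega) (by simp only [List.length_cons, Nat.add_eq]; omega)]

theorem pvMerge_nil (ys : List (List (String × Int))) : pvMerge [] ys = ys := by
  unfold pvMerge; cases ys <;> simp [pvMergeGo]

theorem pvMerge_nil_right (x : List (String × Int)) (xs : List (List (String × Int))) :
    pvMerge (x :: xs) [] = x :: xs := by
  unfold pvMerge; simp [pvMergeGo]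

theorem pvMerge_cons (x y : List (String × Int)) (xs ys : List (List (String × Int))) :
    pvMerge (x :: xs) (y :: ys)
      = if pvTime x ≤ pvTime y then x :: pvMerge xs (y :: ys) else y :: pvMerge (x :: xs) ys := by
  unfold pvMerge
  simp only [List.length_cons, pvMergeGo]
  by_cases hc : pvTime x ≤ pvTime y
  · simp only [hc, if_true]
    exact congrArg (x :: ·) (pvMergeGo_fuel _ _ _ _ (by simp only [List.length_cons, Nat.add_eq]; omega) (by simp only [List.length_cons, Nat.add_eq]; omega))
  · simp only [hc, if_false]
    exact congrArg (y :: ·) (pvMergeGo_fuel _ _ _ _ (by simp only [List.length_cons, Nat.add_eq]; omega) (by simp only [List.length_cons, Nat.add_eq]; omega))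

theorem pvMerge_nil2 (xs : List (List (String × Int))) : pvMerge xs [] = xs := by
  cases xs <;> simp [pvMerge_nil, pvMerge_nil_right]

theorem pvTime_note (a t : Int) : pvTime [("num", a), ("time", t)] = t := by
  simp [pvTime, PySem.Dict.getD, PySem.Dict.get?]

theorem enum_last (xs : List Int) (s a : Int) :
    (PySem.List.enumerate xs s).foldl (fun _ ip => ip.1) a
      = if xs = [] then a else s + (xs.length : Int) - 1 := by
  induction xs generalizing s a with
  | nil => simp [PySem.List.enumerate]
  | cons x t ih =>
      simp only [PySem.List.enumerate, List.foldl_cons, ih]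
      by_cases h : t = [] <;> simp [h] <;> omega

theorem enum_idx_bounds (xs : List Int) (s : Int) :
    ∀ p ∈ PySem.List.enumerate xs s, s ≤ p.1 ∧ p.1 < s + (xs.length : Int) := by
  induction xs generalizing s with
  | nil => simp [PySem.List.enumerate]
  | cons x t ih =>
      intro p hp
      simp only [PySem.List.enumerate, List.mem_cons] at hp
      rcases hp with h | h
      · subst h; constructor <;> simp <;> omega
      · have := ih (s + 1) p h; simp only [List.length_cons] at *; constructor <;> push_cast at * <;> omega

theorem enum_idx_pairwise (xs : List Int) (s : Int) :
    (PySem.List.enumerate xs s).Pairwise (fun a b => a.1 < b.1) := by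
  induction xs generalizing s with
  | nil => simp [PySem.List.enumerate]
  | cons x t ih =>
      simp only [PySem.List.enumerate]
      exact List.Pairwise.cons
        (fun p hp => by have := enum_idx_bounds t (s + 1) p hp; omega) (ih (s + 1))

theorem insert_merge (x : List (String × Int)) (M H : List (List (String × Int)))
    (hH : ∀ y ∈ H, pvTime x < pvTime y) :
    pvMerge (PySem.List.insertBy (fun a b => decide (pvTime a < pvTime b)) x M) H
      = pvMerge M (x :: H) := by
  induction M generalizing H with
  | nil =>
      cases H with
      | nil => simp [PySem.List.insertBy, pvMerge_nil, pvMerge_nil_right]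
      | cons h H' =>
          have hx := hH h (by simp)
          simp [PySem.List.insertBy, pvMerge_nil, pvMerge_cons, le_of_lt hx]
  | cons m M' ih =>
      by_cases hc : pvTime x < pvTime m
      · cases H with
        | nil => simp [PySem.List.insertBy, hc, pvMerge_nil_right, pvMerge_cons, not_le.mpr hc]
        | cons h H' =>
            have hx := hH h (by simp)
            simp [PySem.List.insertBy, hc, pvMerge_cons, not_le.mpr hc, le_of_lt hx]
      · have hmx : pvTime m ≤ pvTime x := le_of_not_gt hc
        cases H with
        | nil =>
            have h1 := ih [] (by simp)
            rw [pvMerge_nil2] at h1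
            simp [PySem.List.insertBy, hc, pvMerge_nil2, pvMerge_cons, hmx, h1]
        | cons h H' =>
            have hx := hH h (by simp)
            have hmh : pvTime m ≤ pvTime h := le_trans hmx (le_of_lt hx)
            have h1 := ih (h :: H') hH
            simp [PySem.List.insertBy, hc, pvMerge_cons, hmx, hmh, h1]

theorem foldl_insert_merge (M H : List (List (String × Int)))
    (hH : H.Pairwise (fun a b => pvTime a < pvTime b)) :
    H.foldl (fun acc x => PySem.List.insertBy (fun a b => decide (pvTime a < pvTime b)) x acc) M
      = pvMerge M H := by
  induction H generalizing M with
  | nil => cases M <;> simp [pvMerge_nil, pvMerge_nil_right]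
  | cons x H' ih =>
      rcases List.pairwise_cons.mp hH with ⟨hx, hH'⟩
      simp only [List.foldl_cons]
      rw [ih _ hH', insert_merge x M H' hx]

theorem sorted_append_merge (M H : List (List (String × Int)))
    (hM : M.Pairwise (fun a b => pvTime a ≤ pvTime b))
    (hH : H.Pairwise (fun a b => pvTime a < pvTime b)) :
    PySem.List.sorted (M ++ H) pvTime = pvMerge M H := by
  rw [PySem.List.sorted_eq_foldl_insertBy, List.foldl_append]
  rw [← PySem.List.sorted_eq_foldl_insertBy, PySem.List.sorted_eq_self_of_pairwise _ _ hM]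
  exact foldl_insert_merge M H hH

def melB (m : List Int) : List (List (String × Int)) :=
  (PySem.List.enumerate m).map (fun ip => [("num", ip.2 + 1), ("time", 300 * ip.1)])
    ++ [[("num", (PySem.List.pyGet? m 0).getD 0 + 1), ("time", 300 * (m.length : Int))]]

def harB (m h : List Int) : List (List (String × Int)) :=
  (PySem.List.enumerate h).map (fun ip => [("num", ip.2 + 8), ("time", 150 * ip.1)])
    ++ [[("num", (PySem.List.pyGet? m 0).getD 0 + 8), ("time", 150 * (h.length : Int))]]

theorem melB_pairwise (m : List Int) :
    (melB m).Pairwise (fun a b => pvTime a ≤ pvTime b) := by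
  unfold melB
  rw [List.pairwise_append]
  refine ⟨?_, by simp, ?_⟩
  · rw [List.pairwise_map]
    exact (enum_idx_pairwise m 0).imp (fun hab => by simp only [pvTime_note]; omega)
  · intro a ha b hb
    simp only [List.mem_singleton] at hb; subst hb
    simp only [List.mem_map] at ha; obtain ⟨ip, hip, rfl⟩ := ha
    have := enum_idx_bounds m 0 ip hip
    simp only [pvTime_note]; omega

theorem harB_pairwise (m h : List Int) :
    (harB m h).Pairwise (fun a b => pvTime a < pvTime b) := by
  unfold harB
  rw [List.pairwise_append]
  refine ⟨?_, by simp, ?_⟩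
  · rw [List.pairwise_map]
    exact (enum_idx_pairwise h 0).imp (fun hab => by simp only [pvTime_note]; omega)
  · intro a ha b hb
    simp only [List.mem_singleton] at hb; subst hb
    simp only [List.mem_map] at ha; obtain ⟨ip, hip, rfl⟩ := ha
    have := enum_idx_bounds h 0 ip hip
    simp only [pvTime_note]; omega

theorem loopA (xs : List Int) (note : Int × Int → List (String × Int))
    (acc : List (List (String × Int))) :
    (PySem.List.enumerate xs).foldl
        (fun (s : List (List (String × Int)) × Int) ip => (s.1 ++ [note ip], ip.1)) (acc, 0)
      = (acc ++ (PySem.List.enumerate xs).map note,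
         if xs = [] then 0 else (xs.length : Int) - 1) := by
  rw [PySem.List.foldl_prod_mk (f := fun a ip => a ++ [note ip]) (g := fun _ ip => ip.1)]
  rw [PySem.List.foldl_append_singleton_eq_map, enum_last]
  simp

theorem B_eq (m h : List Int) : create_toy_piano_alt m h = pvMerge (melB m) (harB m h) := rfl

theorem A_eq (m h : List Int) (hm : m ≠ []) (hh : h ≠ []) :
    create_toy_piano m h = PySem.List.sorted (melB m ++ harB m h) pvTime := by
  simp only [create_toy_piano]
  rw [loopA m (fun ip => [("num", ip.2 + 1), ("time", ip.1 * 150 * 2)]) []]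
  rw [loopA h (fun ip => [("num", ip.2 + 7 + 1), ("time", ip.1 * 150)])]
  simp only [if_neg hm, if_neg hh, List.nil_append]
  rw [show (fun k => PySem.Dict.getD (PySem.Dict.mk k) "time" 0) = pvTime from rfl]
  congr 1
  unfold melB harB
  rw [List.append_assoc]
  congr 1
  · congr 1
    · exact List.map_congr_left (fun ip _ => by simp only [List.cons.injEq, Prod.mk.injEq]; norm_num; omega)
    · simp only [List.cons.injEq, Prod.mk.injEq]; norm_num; omega
  · congr 1
    · exact List.map_congr_left (fun ip _ => by simp only [List.cons.injEq, Prod.mk.injEq]; norm_num; omega)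
    · simp only [List.cons.injEq, Prod.mk.injEq]; norm_num; omega



theorem mem_mergeGo (f : Nat) (xs ys : List (List (String × Int))) (x : List (String × Int))
    (hx : x ∈ pvMergeGo f xs ys) : x ∈ xs ∨ x ∈ ys := by
  induction f generalizing xs ys with
  | zero => simpa [pvMergeGo] using hx
  | succ f ih =>
      cases xs with
      | nil => simp [pvMergeGo] at hx; simp [hx]
      | cons a as =>
          cases ys with
          | nil => simp [pvMergeGo] at hx; simp [hx]
          | cons b bs =>
              simp only [pvMergeGo] at hx
              split at hx <;> rcases List.mem_cons.mp hx with h1 | h1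
              · simp [h1]
              · rcases ih _ _ h1 with h2 | h2 <;> simp_all
              · simp [h1]
              · rcases ih _ _ h1 with h2 | h2 <;> simp_all

theorem mem_merge (xs ys : List (List (String × Int))) (x : List (String × Int))
    (hx : x ∈ pvMerge xs ys) : x ∈ xs ∨ x ∈ ys := mem_mergeGo _ xs ys x hx

-- ===== VERDICT (by name: the statements are the Claim_ definitions above) =====
theorem create_toy_piano_spec : Claim_unchanged_create_toy_piano := by
  intro m h _ hpre hd
  have hh : h ≠ [] := hd
  show create_toy_piano m h = create_toy_piano_alt m h
  rw [A_eq m h hpre hh, B_eq, sorted_append_merge _ _ (melB_pairwise m) (harB_pairwise m h)]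

theorem create_toy_piano_changed : Claim_changed_create_toy_piano := by
  unfold Claim_changed_create_toy_piano; decide

theorem create_toy_piano_tight : Claim_exact_create_toy_piano := by
  intro m h _ hpre hd
  have hd' : h = [] := hd
  subst hd'
  intro heq
  set m0 : Int := (PySem.List.pyGet? m 0).getD 0 with hm0
  have hA : [("num", m0 + 7 + 1), ("time", (0 + 1) * 150)] ∈ create_toy_piano m [] := by
    simp only [create_toy_piano]
    rw [loopA m (fun ip => [("num", ip.2 + 1), ("time", ip.1 * 150 * 2)]) []]
    rw [PySem.List.mem_sorted]
    simp only [PySem.List.enumerate, List.foldl_nil]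
    exact List.mem_append_right _ (by simp [hm0])
  have hB : [("num", m0 + 7 + 1), ("time", (0 + 1) * 150)] ∉ create_toy_piano_alt m [] := by
    intro hmem
    rw [B_eq] at hmem
    rcases mem_merge _ _ _ hmem with hc | hc
    · unfold melB at hc
      rcases List.mem_append.mp hc with hc | hc
      · obtain ⟨ip, _, hip⟩ := List.mem_map.mp hc
        have := congrArg pvTime hip
        simp only [pvTime_note] at this
        omega
      · simp only [List.mem_singleton] at hc
        have := congrArg pvTime hc
        simp only [pvTime_note] at this
        omega
    · unfold harB at hc
      simp only [PySem.List.enumerate, List.map_nil, List.nil_append, List.mem_singleton] at hc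
      have := congrArg pvTime hc
      simp only [pvTime_note] at this
      simp at this
  exact hB (heq ▸ hA)
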